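-- pv_equiv track=rewrite | github.com/aorursy/KT_dataset_py | yokolet_kernelcfbd2360d8.py | multi_word_search
-- ===== SOURCE A (Python) =====
-- def multi_word_search(doc_list, keywords):
--     """
--     Takes list of documents (each document is a string) and a list of keywords.
--     Returns a dictionary where each key is a keyword, and the value is a list of indices
--     (from doc_list) of the documents containing that keyword
--
--     >>> doc_list = ["The Learn Python Challenge Casino.", "They bought a car and a casino", "Casinoville"]
--     >>> keywords = ['casino', 'they']
--     >>> multi_word_search(doc_list, keywords)
--     {'casino': [0, 1], 'they': [1]}
--     """
--     result = {}
--     for keyword in keywords: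
--         result[keyword] = []
--     key_set = set(keywords)
--     for index, doc in enumerate(doc_list):
--         words = doc.replace(',', ' ').replace('.', ' ').lower().split()
--         word_set = set(words)
--         for word in key_set & word_set:
--             result[word].append(index)
--
--     return result
-- ===== SOURCE B (Python) =====
-- def multi_word_search(doc_list, keywords):
--     # Build a full inverted index word -> ascending doc indices in one pass,
--     # then answer each keyword by a direct lookup.
--     index = {}
--     for i, doc in enumerate(doc_list):
--         for word in set(doc.replace(',', ' ').replace('.', ' ').lower().split()):
--             index.setdefault(word, []).append(i)
--     result = {}
--     for keyword in keywords:
--         result[keyword] = list(index.get(keyword, []))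
--     return result
-- ===== Notes on version B (the rewrite author's own statement) =====
-- stated objective: alternative
-- what changed: Instead of intersecting each document's word set with the keyword set and appending into a pre-keyed dict, B builds a complete inverted index (word -> ascending doc indices) in one pass over the documents and then answers every keyword by a single dict lookup.
import Mathlib
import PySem

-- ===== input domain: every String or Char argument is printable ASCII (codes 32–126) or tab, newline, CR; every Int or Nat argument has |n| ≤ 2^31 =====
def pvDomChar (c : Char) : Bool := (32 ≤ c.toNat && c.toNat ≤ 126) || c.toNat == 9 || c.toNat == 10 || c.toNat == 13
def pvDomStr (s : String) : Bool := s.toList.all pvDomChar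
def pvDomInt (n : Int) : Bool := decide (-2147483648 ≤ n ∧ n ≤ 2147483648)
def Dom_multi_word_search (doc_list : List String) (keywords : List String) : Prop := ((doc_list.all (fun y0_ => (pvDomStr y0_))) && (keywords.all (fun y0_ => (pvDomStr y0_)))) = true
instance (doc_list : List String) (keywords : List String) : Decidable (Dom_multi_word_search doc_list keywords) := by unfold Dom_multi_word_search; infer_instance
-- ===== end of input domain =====

-- B replaces A's per-document intersection with the keyword set by a full inverted index
-- (word -> ascending doc indices) built in one pass, then a lookup per keyword (objective: alternative).


-- ===== PORT A =====
-- shared tokenization, identical in both Pythons: doc.replace(',', ' ').replace('.', ' ').lower().split()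
def pvWords (doc : String) : List String :=
  PySem.Str.split₀ (PySem.Str.lower (PySem.Str.replace (PySem.Str.replace doc "," " ") "." " "))

def multi_word_search (doc_list : List String) (keywords : List String) : List (String × List Int) :=
  -- result = {}; for keyword in keywords: result[keyword] = []
  let result : PySem.Dict String (List Int) :=
    keywords.foldl (fun r keyword => r.insert keyword []) PySem.Dict.empty
  let key_set : PySem.Set String := PySem.Set.ofList keywords
  -- for index, doc in enumerate(doc_list): … for word in key_set & word_set: result[word].append(index)
  -- result[word].append(index): word ∈ key_set so the key is always present; modify with default [] is exact there
  let result :=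
    (PySem.List.enumerate doc_list).foldl
      (fun r p =>
        let words := pvWords p.2
        let word_set : PySem.Set String := PySem.Set.ofList words
        (PySem.Set.inter key_set word_set).foldl
          (fun r word => r.modify word [] (fun l => l ++ [p.1])) r)
      result
  result.items

-- ===== PORT B =====
def multi_word_search_alt (doc_list : List String) (keywords : List String) : List (String × List Int) :=
  -- index = {}; for i, doc in enumerate(doc_list): for word in set(tokens): index.setdefault(word, []).append(i)
  -- index.setdefault(word, []).append(i) stores (current value or []) ++ [i] at word: exactly insert word (getD word [] ++ [i])
  let index : PySem.Dict String (List Int) :=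
    (PySem.List.enumerate doc_list).foldl
      (fun d p =>
        (PySem.Set.ofList (pvWords p.2)).foldl
          (fun d word => d.insert word (d.getD word [] ++ [p.1])) d)
      PySem.Dict.empty
  -- result = {}; for keyword in keywords: result[keyword] = list(index.get(keyword, []))
  let result : PySem.Dict String (List Int) :=
    keywords.foldl (fun r keyword => r.insert keyword (index.getD keyword [])) PySem.Dict.empty
  result.items

-- ===== PRECONDITION & SPEC =====
def Spec_multi_word_search (doc_list : List String) (keywords : List String) (out : List (String × List Int)) : Prop := out = multi_word_search_alt doc_list keywords
instance (doc_list : List String) (keywords : List String) (out : List (String × List Int)) : Decidable (Spec_multi_word_search doc_list keywords out) := by unfold Spec_multi_word_search; infer_instance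

-- ===== CLAIM (what is proved, stated in full; the proofs are below) =====
def Claim_equal_multi_word_search : Prop := ∀ (doc_list : List String) (keywords : List String), Dom_multi_word_search doc_list keywords → Spec_multi_word_search doc_list keywords (multi_word_search doc_list keywords)

-- ===== LEMMAS AND PROOFS =====

-- the intended value at keyword w: indices (with their enumerate tags) of documents containing w
def pvOccP (ps : List (Int × String)) (w : String) : List Int :=
  (ps.filter (fun p => decide (w ∈ pvWords p.2))).map Prod.fst

theorem pv_update_subset (s : PySem.Set String) (xs : List String)
    (h : ∀ x ∈ xs, x ∈ s) : PySem.Set.update s xs = s := by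
  rw [PySem.Set.update_eq_append_filter]
  have h0 : List.filter (fun y => !PySem.Set.contains s y) (PySem.Set.ofList xs) = [] := by
    apply List.filter_eq_nil_iff.mpr
    intro y hy
    have hys : y ∈ s := h y ((PySem.Set.mem_ofList xs y).mp hy)
    simp [hys]
  rw [h0, List.append_nil]

-- A's inner loop (append index to each key of the intersection), at the level of getD
theorem pv_A_inner (S : List String) (hS : S.Nodup) (d : PySem.Dict String (List Int))
    (z : Int) (w : String) :
    (S.foldl (fun r word => r.modify word [] (fun l => l ++ [z])) d).getD w []
      = if w ∈ S then d.getD w [] ++ [z] else d.getD w [] := by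
  induction S generalizing d with
  | nil => simp
  | cons x S ih =>
    rcases List.nodup_cons.mp hS with ⟨hx, hS'⟩
    simp only [List.foldl_cons, ih hS', PySem.Dict.getD_modify, List.mem_cons]
    by_cases hwS : w ∈ S
    · have : w ≠ x := fun h => hx (h ▸ hwS)
      simp [hwS, this]
    · by_cases hwx : w = x <;> simp [hwS, hwx, hx]

-- B's inner loop (append index at each distinct word of the document), at the level of getD
theorem pv_B_inner (S : List String) (hS : S.Nodup) (d : PySem.Dict String (List Int))
    (z : Int) (w : String) :
    (S.foldl (fun r word => r.insert word (r.getD word [] ++ [z])) d).getD w []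
      = if w ∈ S then d.getD w [] ++ [z] else d.getD w [] := by
  induction S generalizing d with
  | nil => simp
  | cons x S ih =>
    rcases List.nodup_cons.mp hS with ⟨hx, hS'⟩
    simp only [List.foldl_cons, ih hS', PySem.Dict.getD_insert, List.mem_cons]
    by_cases hwS : w ∈ S
    · have : w ≠ x := fun h => hx (h ▸ hwS)
      simp [hwS, this]
    · by_cases hwx : w = x <;> simp [hwS, hwx, hx]

-- a loop 'for k in kws: r[k] = g(k)' with a value depending only on the key, at the level of getD
theorem pv_insert_loop_getD (g : String → List Int) (kws : List String)
    (d : PySem.Dict String (List Int)) (w : String) :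
    (kws.foldl (fun r k => r.insert k (g k)) d).getD w []
      = if w ∈ kws then g w else d.getD w [] := by
  induction kws generalizing d with
  | nil => simp
  | cons x kws ih =>
    simp only [List.foldl_cons, ih, PySem.Dict.getD_insert, List.mem_cons]
    by_cases hwS : w ∈ kws
    · simp [hwS]
    · by_cases hwx : w = x <;> simp [hwS, hwx]

-- A's document loop: each key of the keyword set accumulates exactly its occurrence list
theorem pv_A_outer (K : PySem.Set String) (hK : K.Nodup) (ps : List (Int × String))
    (d : PySem.Dict String (List Int)) (w : String) (hw : w ∈ K) :
    (ps.foldl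
        (fun r p =>
          (PySem.Set.inter K (PySem.Set.ofList (pvWords p.2))).foldl
            (fun r word => r.modify word [] (fun l => l ++ [p.1])) r) d).getD w []
      = d.getD w [] ++ pvOccP ps w := by
  induction ps generalizing d with
  | nil => simp [pvOccP]
  | cons p ps ih =>
    simp only [List.foldl_cons, ih]
    rw [pv_A_inner _ (PySem.Set.nodup_inter K _ hK)]
    have hmem : w ∈ PySem.Set.inter K (PySem.Set.ofList (pvWords p.2)) ↔ w ∈ pvWords p.2 := by
      rw [PySem.Set.mem_inter]
      simp [PySem.Set.mem_ofList, hw]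
    by_cases hwp : w ∈ pvWords p.2
    · simp [pvOccP, hmem.mpr hwp, hwp]
    · simp [pvOccP, hwp, hmem]

-- B's document loop: the inverted index maps every word to its occurrence list
theorem pv_B_outer (ps : List (Int × String)) (d : PySem.Dict String (List Int)) (w : String) :
    (ps.foldl
        (fun d p =>
          (PySem.Set.ofList (pvWords p.2)).foldl
            (fun d word => d.insert word (d.getD word [] ++ [p.1])) d) d).getD w []
      = d.getD w [] ++ pvOccP ps w := by
  induction ps generalizing d with
  | nil => simp [pvOccP]
  | cons p ps ih =>
    simp only [List.foldl_cons, ih]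
    rw [pv_B_inner _ (PySem.Set.nodup_ofList _)]
    by_cases hwp : w ∈ pvWords p.2
    · simp [pvOccP, PySem.Set.mem_ofList, hwp]
    · simp [pvOccP, PySem.Set.mem_ofList, hwp]

-- A's document loop leaves the key list unchanged (every modified key is already present)
theorem pv_A_keys (K : PySem.Set String) (ps : List (Int × String))
    (d : PySem.Dict String (List Int)) (hd : d.keys = K) :
    (ps.foldl
        (fun r p =>
          (PySem.Set.inter K (PySem.Set.ofList (pvWords p.2))).foldl
            (fun r word => r.modify word [] (fun l => l ++ [p.1])) r) d).keys = K := by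
  induction ps generalizing d with
  | nil => exact hd
  | cons p ps ih =>
    simp only [List.foldl_cons]
    apply ih
    rw [PySem.Dict.keys_foldl_modify _ _ (fun _ _ => fun l => l ++ [p.1]), hd]
    exact pv_update_subset K _ (fun x hx => ((PySem.Set.mem_inter K _ x).mp hx).1)

-- ===== VERDICT (by name: the statement is the Claim_ definition above) =====
theorem multi_word_search_spec : Claim_equal_multi_word_search := by
  intro doc_list keywords _
  unfold Spec_multi_word_search multi_word_search multi_word_search_alt
  set K := PySem.Set.ofList keywords with hKdef
  have hKnd : K.Nodup := PySem.Set.nodup_ofList keywords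
  set ps := PySem.List.enumerate doc_list 0 with hps
  -- A's final dict
  set dA := ps.foldl
      (fun r p =>
        (PySem.Set.inter K (PySem.Set.ofList (pvWords p.2))).foldl
          (fun r word => r.modify word [] (fun l => l ++ [p.1])) r)
      (keywords.foldl (fun r keyword => r.insert keyword []) PySem.Dict.empty) with hdA
  -- B's dicts
  set idx := ps.foldl
      (fun d p =>
        (PySem.Set.ofList (pvWords p.2)).foldl
          (fun d word => d.insert word (d.getD word [] ++ [p.1])) d)
      PySem.Dict.empty with hidx
  set dB := keywords.foldl (fun r keyword => r.insert keyword (idx.getD keyword [])) PySem.Dict.empty with hdB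
  -- keys
  have hkA0 : (keywords.foldl (fun r keyword => r.insert keyword ([] : List Int)) PySem.Dict.empty).keys = K := by
    rw [PySem.Dict.keys_foldl_insert _ (fun _ _ => ([] : List Int)), PySem.Dict.keys_empty]
    exact PySem.Set.update_empty keywords
  have hkA : dA.keys = K := pv_A_keys K ps _ hkA0
  have hkB : dB.keys = K := by
    rw [hdB, PySem.Dict.keys_foldl_insert _ (fun _ keyword => idx.getD keyword []), PySem.Dict.keys_empty]
    exact PySem.Set.update_empty keywords
  -- items via keys + getD
  rw [PySem.Dict.items_eq_map_keys dA (hkA ▸ hKnd) [], PySem.Dict.items_eq_map_keys dB (hkB ▸ hKnd) [], hkA, hkB]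
  apply List.map_congr_left
  intro w hwK
  have hA : dA.getD w [] = pvOccP ps w := by
    rw [hdA, pv_A_outer K hKnd ps _ w hwK,
        pv_insert_loop_getD (fun _ => ([] : List Int)) keywords PySem.Dict.empty w]
    simp [(PySem.Set.mem_ofList keywords w).mp hwK]
  have hB : dB.getD w [] = pvOccP ps w := by
    rw [hdB, pv_insert_loop_getD (fun keyword => idx.getD keyword []) keywords PySem.Dict.empty w]
    simp only [(PySem.Set.mem_ofList keywords w).mp hwK, if_pos]
    rw [hidx, pv_B_outer ps PySem.Dict.empty w, PySem.Dict.getD_empty]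
    simp
  rw [hA, hB]
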